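-- pv_equiv track=rewrite | github.com/tkamsker/gha1javarag | src/parsers/java_parser.py | _extract_modifiers_at_position
-- ===== SOURCE A (Python) =====
-- from typing import Dict, List, Any, Optional, Set
--
-- def _extract_modifiers_at_position(content: str, position: int) -> List[str]:
--     """Extract modifiers at a specific position."""
--     before_position = content[:position]
--     lines = before_position.split('\n')
--
--     modifiers = []
--     for line in reversed(lines):
--         line = line.strip()
--         if not line or line.endswith('{') or line.endswith(';'):
--             break
--         if line.startswith('@'):
--             continue
--         # Extract common modifiers
--         modifier_keywords = ['public', 'private', 'protected', 'static', 'final',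
--                            'abstract', 'synchronized', 'volatile', 'transient', 'native']
--         for keyword in modifier_keywords:
--             if keyword in line:
--                 modifiers.insert(0, keyword)
--
--     return modifiers
-- ===== SOURCE B (Python) =====
-- def _extract_modifiers_at_position(content: str, position: int):
--     """Extract modifiers at a specific position (single forward pass)."""
--     modifier_keywords = ['public', 'private', 'protected', 'static', 'final',
--                          'abstract', 'synchronized', 'volatile', 'transient', 'native']
--     modifiers = []
--     for line in content[:position].split('\n'):
--         line = line.strip()
--         if not line or line.endswith('{') or line.endswith(';'):
--             modifiers = []
--         elif line.startswith('@'):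
--             continue
--         else:
--             for keyword in reversed(modifier_keywords):
--                 if keyword in line:
--                     modifiers.append(keyword)
--     return modifiers
-- ===== Notes on version B (the rewrite author's own statement) =====
-- stated objective: alternative
-- what changed: Replaced the backward scan with break and insert(0) by a single forward fold over the lines that resets its accumulator at block boundaries and appends keywords in reversed keyword order.
import Mathlib
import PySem

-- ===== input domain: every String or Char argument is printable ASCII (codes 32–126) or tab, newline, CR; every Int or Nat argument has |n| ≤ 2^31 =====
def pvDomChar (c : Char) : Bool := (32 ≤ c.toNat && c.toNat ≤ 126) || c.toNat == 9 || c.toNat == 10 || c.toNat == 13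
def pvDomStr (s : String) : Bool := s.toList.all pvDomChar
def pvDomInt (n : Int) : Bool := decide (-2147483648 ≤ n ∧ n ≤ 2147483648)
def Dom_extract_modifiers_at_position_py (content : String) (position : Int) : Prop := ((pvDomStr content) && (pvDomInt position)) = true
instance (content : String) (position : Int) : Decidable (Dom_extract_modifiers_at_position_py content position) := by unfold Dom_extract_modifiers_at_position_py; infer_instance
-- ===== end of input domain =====

-- B replaces A's backward scan+break with a forward fold that resets at block boundaries (alternative decomposition, same result).


-- ===== PORT A =====
def pvKeywords : List String := ["public", "private", "protected", "static", "final",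
  "abstract", "synchronized", "volatile", "transient", "native"]

-- inner 'for keyword in modifier_keywords: if keyword in line: modifiers.insert(0, keyword)'
def pvLineKwA (s : List Char) (mods : List String) : List String :=
  pvKeywords.foldl (fun m k => if PySem.Chars.isIn k.toList s then k :: m else m) mods

-- 'for line in reversed(lines): ...' with break / continue
def pvLoopA : List (List Char) → List String → List String
  | [], mods => mods
  | l :: rest, mods =>
    let s := PySem.Chars.strip l
    if s = [] ∨ PySem.Chars.endswith s ['{'] ∨ PySem.Chars.endswith s [';'] then mods
    else if PySem.Chars.startswith s ['@'] then pvLoopA rest mods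
    else pvLoopA rest (pvLineKwA s mods)

def extract_modifiers_at_position_py (content : String) (position : Int) : List String :=
  let before := PySem.List.slice content.toList none (some position)
  let lines := PySem.Chars.splitOn before ['\n']
  pvLoopA lines.reverse []

-- ===== PORT B =====
-- one forward step of B: reset on boundary, skip '@', else append keywords in reversed order
def pvStepB (mods : List String) (l : List Char) : List String :=
  let s := PySem.Chars.strip l
  if s = [] ∨ PySem.Chars.endswith s ['{'] ∨ PySem.Chars.endswith s [';'] then []
  else if PySem.Chars.startswith s ['@'] then mods
  else pvKeywords.reverse.foldl (fun m k => if PySem.Chars.isIn k.toList s then m ++ [k] else m) mods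

def extract_modifiers_at_position_py_alt (content : String) (position : Int) : List String :=
  (PySem.Chars.splitOn (PySem.List.slice content.toList none (some position)) ['\n']).foldl pvStepB []

-- ===== PRECONDITION & SPEC =====
def Spec_extract_modifiers_at_position_py (content : String) (position : Int) (out : List String) : Prop := out = extract_modifiers_at_position_py_alt content position
instance (content : String) (position : Int) (out : List String) : Decidable (Spec_extract_modifiers_at_position_py content position out) := by unfold Spec_extract_modifiers_at_position_py; infer_instance

-- ===== CLAIM (what is proved, stated in full; the proofs are below) =====
def Claim_equal_extract_modifiers_at_position_py : Prop := ∀ (content : String) (position : Int), Dom_extract_modifiers_at_position_py content position → Spec_extract_modifiers_at_position_py content position (extract_modifiers_at_position_py content position)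

-- ===== LEMMAS AND PROOFS =====

-- within one line: A's insert(0) fold prepends the reversed filtered keyword list
lemma pvLineKwA_eq (s : List Char) (mods : List String) :
    pvLineKwA s mods = (pvKeywords.filter (fun k => PySem.Chars.isIn k.toList s)).reverse ++ mods := by
  unfold pvLineKwA
  generalize pvKeywords = ks
  induction ks generalizing mods with
  | nil => simp
  | cons k ks ih =>
    simp only [List.foldl_cons, List.filter_cons]
    by_cases h : PySem.Chars.isIn k.toList s = true
    · simp [h, ih]
    · simp [h, ih]

-- within one line: B's append fold over the reversed keywords appends the same list
lemma pvStepB_line_eq (s : List Char) (mods : List String) :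
    pvKeywords.reverse.foldl (fun m k => if PySem.Chars.isIn k.toList s then m ++ [k] else m) mods
      = mods ++ (pvKeywords.filter (fun k => PySem.Chars.isIn k.toList s)).reverse := by
  rw [PySem.List.foldl_append_if (fun k => PySem.Chars.isIn k.toList s) (fun (x : String) => x)]
  simp [List.filter_reverse]

-- the backward loop with break equals the forward fold that resets at boundaries
lemma pvLoopA_eq_foldl (rs : List (List Char)) :
    ∀ mods, pvLoopA rs mods = rs.reverse.foldl pvStepB [] ++ mods := by
  induction rs with
  | nil => simp [pvLoopA]
  | cons l rest ih =>
    intro mods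
    simp only [List.reverse_cons, List.foldl_append, List.foldl_cons, List.foldl_nil]
    rw [pvLoopA]
    by_cases hb : PySem.Chars.strip l = [] ∨ PySem.Chars.endswith (PySem.Chars.strip l) ['{'] = true
        ∨ PySem.Chars.endswith (PySem.Chars.strip l) [';'] = true
    · rw [if_pos hb]
      unfold pvStepB
      simp [hb]
    · rw [if_neg hb]
      by_cases ha : PySem.Chars.startswith (PySem.Chars.strip l) ['@'] = true
      · rw [if_pos ha, ih]
        unfold pvStepB
        simp [hb, ha]
      · rw [if_neg ha, ih]
        unfold pvStepB
        simp only [if_neg hb, if_neg ha]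
        rw [pvLineKwA_eq, pvStepB_line_eq, List.append_assoc]


-- ===== VERDICT (by name: the statement is the Claim_ definition above) =====
theorem extract_modifiers_at_position_py_spec : Claim_equal_extract_modifiers_at_position_py := by
  intro content position _
  show extract_modifiers_at_position_py content position = extract_modifiers_at_position_py_alt content position
  unfold extract_modifiers_at_position_py extract_modifiers_at_position_py_alt
  rw [pvLoopA_eq_foldl]
  simp
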